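-- pv_equiv track=rewrite | github.com/KimJonghoSNU/Abstraction_gap | src/run_round6_hypbank.py | _resolve_new_branch_frontier_child
-- ===== SOURCE A (Python) =====
-- from typing import Any, Dict, List, Optional, Sequence, Set, Tuple
--
-- def _resolve_new_branch_frontier_child(
--     leaf_path: Tuple[int, ...],
--     new_branch_paths: Sequence[Tuple[int, ...]],
-- ) -> Tuple[int, ...]:
--     matched_branch_paths = [
--         tuple(branch_path)
--         for branch_path in list(new_branch_paths or [])
--         if branch_path and _leaf_path_is_under_prefix(tuple(leaf_path), tuple(branch_path))
--     ]
--     if not matched_branch_paths: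
--         return tuple(leaf_path)
--     anchor_path = max(matched_branch_paths, key=len)
--     child_depth = min(len(tuple(leaf_path)), len(anchor_path) + 1)
--     return tuple(leaf_path[:child_depth])
--
-- def _leaf_path_is_under_prefix(path: Tuple[int, ...], prefix: Tuple[int, ...]) -> bool:
--     return (len(prefix) <= len(path)) and (tuple(path[: len(prefix)]) == tuple(prefix))
-- ===== SOURCE B (Python) =====
-- def _resolve_new_branch_frontier_child(leaf_path, new_branch_paths):
--     leaf = tuple(leaf_path)
--     n = len(leaf)
--     branch_set = {tuple(bp) for bp in (new_branch_paths or []) if bp}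
--     candidate_lengths = {len(bp) for bp in branch_set if len(bp) <= n}
--     for i in reversed(sorted(candidate_lengths)):
--         if leaf[:i] in branch_set:
--             return leaf[: min(n, i + 1)]
--     return leaf
-- ===== Notes on version B (the rewrite author's own statement) =====
-- stated objective: alternative
-- what changed: B builds a hash-set index of the non-empty branch paths and then probes the leaf's OWN prefixes against it, trying the distinct candidate prefix lengths in decreasing order and returning at the first hit; A instead scans the branch list testing each branch against the leaf, materialises the list of matches and takes its max by length.
import Mathlib
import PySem

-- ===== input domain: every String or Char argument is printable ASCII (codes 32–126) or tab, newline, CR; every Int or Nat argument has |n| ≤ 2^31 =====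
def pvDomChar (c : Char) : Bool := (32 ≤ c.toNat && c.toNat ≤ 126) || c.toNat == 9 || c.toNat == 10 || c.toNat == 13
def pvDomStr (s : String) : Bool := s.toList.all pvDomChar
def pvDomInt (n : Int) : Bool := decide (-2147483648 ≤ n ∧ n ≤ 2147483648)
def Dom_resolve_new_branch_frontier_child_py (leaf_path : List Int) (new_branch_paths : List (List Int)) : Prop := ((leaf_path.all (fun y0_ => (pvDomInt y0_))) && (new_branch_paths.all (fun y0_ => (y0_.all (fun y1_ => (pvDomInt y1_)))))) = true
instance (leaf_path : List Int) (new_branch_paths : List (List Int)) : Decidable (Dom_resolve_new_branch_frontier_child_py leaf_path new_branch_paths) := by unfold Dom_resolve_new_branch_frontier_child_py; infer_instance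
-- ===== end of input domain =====

-- B indexes the non-empty branch paths in a set once and probes the leaf's own prefixes
-- from longest to shortest, instead of scanning the branch list, collecting the matches
-- and taking the max by length. Objective: alternative (same cost class on these sizes).

-- ===== PORT A =====
-- _leaf_path_is_under_prefix(path, prefix)
def leaf_under_prefix_py (path : List Int) (pfx : List Int) : Bool :=
  decide (pfx.length ≤ path.length) &&
    decide (PySem.List.slice path none (some (pfx.length : Int)) = pfx)

def resolve_new_branch_frontier_child_py (leaf_path : List Int) (new_branch_paths : List (List Int)) : List Int :=
  let matched := new_branch_paths.filter (fun bp => !bp.isEmpty && leaf_under_prefix_py leaf_path bp)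
  match PySem.List.max? matched (fun bp => bp.length) with
  | none => leaf_path            -- 'if not matched_branch_paths: return tuple(leaf_path)'
  | some anchor =>
      let child_depth := min leaf_path.length (anchor.length + 1)
      PySem.List.slice leaf_path none (some (child_depth : Int))

-- ===== PORT B =====
-- 'for i in reversed(sorted(candidate_lengths)):' with early return: recursion over that list
def alt_loop (leaf : List Int) (bset : PySem.Set (List Int)) : List Nat → List Int
  | [] => leaf                                   -- loop exhausted: 'return leaf'
  | i :: rest =>
      if PySem.Set.contains bset (leaf.take i) then
        leaf.take (min leaf.length (i + 1))      -- 'return leaf[: min(n, i + 1)]'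
      else alt_loop leaf bset rest

def resolve_new_branch_frontier_child_py_alt (leaf_path : List Int) (new_branch_paths : List (List Int)) : List Int :=
  let n := leaf_path.length
  let bset : PySem.Set (List Int) := PySem.Set.ofList (new_branch_paths.filter (fun bp => !bp.isEmpty))
  let cand : PySem.Set Nat := PySem.Set.ofList ((bset.filter (fun bp => bp.length ≤ n)).map (fun bp => bp.length))
  alt_loop leaf_path bset (PySem.List.sorted cand (fun x => x) false).reverse

-- ===== PRECONDITION & SPEC =====
def Spec_resolve_new_branch_frontier_child_py (leaf_path : List Int) (new_branch_paths : List (List Int)) (out : List Int) : Prop := out = resolve_new_branch_frontier_child_py_alt leaf_path new_branch_paths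
instance (leaf_path : List Int) (new_branch_paths : List (List Int)) (out : List Int) : Decidable (Spec_resolve_new_branch_frontier_child_py leaf_path new_branch_paths out) := by unfold Spec_resolve_new_branch_frontier_child_py; infer_instance

-- ===== CLAIM (what is proved, stated in full; the proofs are below) =====
def Claim_equal_resolve_new_branch_frontier_child_py : Prop := ∀ (leaf_path : List Int) (new_branch_paths : List (List Int)), Dom_resolve_new_branch_frontier_child_py leaf_path new_branch_paths → Spec_resolve_new_branch_frontier_child_py leaf_path new_branch_paths (resolve_new_branch_frontier_child_py leaf_path new_branch_paths)

-- ===== LEMMAS AND PROOFS =====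

-- membership in A's matched list, unfolded
theorem mem_matched_iff (leaf bp : List Int) (nbp : List (List Int)) :
    bp ∈ nbp.filter (fun bp => !bp.isEmpty && leaf_under_prefix_py leaf bp) ↔
      bp ∈ nbp ∧ bp ≠ [] ∧ bp.length ≤ leaf.length ∧ leaf.take bp.length = bp := by
  simp [List.mem_filter, leaf_under_prefix_py, PySem.List.slice_to_natCast]

-- B's set probe, as a statement about the branch list
theorem contains_bset_iff (leaf : List Int) (nbp : List (List Int)) (i : Nat) (hi : 1 ≤ i) (hn : i ≤ leaf.length) :
    PySem.Set.contains (PySem.Set.ofList (nbp.filter (fun bp => !bp.isEmpty))) (leaf.take i) = true ↔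
      ∃ bp ∈ nbp, bp ≠ [] ∧ bp.length = i ∧ bp.length ≤ leaf.length ∧ leaf.take bp.length = bp := by
  rw [PySem.Set.contains_iff, PySem.Set.mem_ofList]
  constructor
  · intro h
    rw [List.mem_filter] at h
    refine ⟨leaf.take i, h.1, ?_, ?_, ?_, ?_⟩
    · intro hnil
      have := congrArg List.length hnil
      simp [Nat.min_eq_left hn] at this
      omega
    · simp [Nat.min_eq_left hn]
    · simp [hn]
    · simp [Nat.min_eq_left hn]
  · rintro ⟨bp, hbp, hne, hlen, _, htk⟩
    rw [List.mem_filter]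
    have : leaf.take i = bp := by rw [← hlen]; exact htk
    rw [this]
    exact ⟨hbp, by simp [hne]⟩

-- membership survives Python's sort (sorted is a permutation, via its insertBy unfolding)
theorem mem_sorted_id (xs : List Nat) (y : Nat) :
    y ∈ PySem.List.sorted xs (fun x => x) false ↔ y ∈ xs := by
  rw [PySem.List.sorted_eq_foldl_insertBy]
  suffices h : ∀ acc : List Nat, y ∈ xs.foldl
      (fun acc x => PySem.List.insertBy (fun a b => decide ((fun x => x) a < (fun x => x) b)) x acc) acc ↔
      y ∈ acc ∨ y ∈ xs by simpa using h []
  induction xs with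
  | nil => simp
  | cons x t ih =>
      intro acc
      rw [List.foldl_cons, ih, PySem.List.mem_insertBy]
      simp
      tauto

-- membership in B's candidate-length list, unfolded to the branch list
theorem mem_cand_iff (leaf : List Int) (nbp : List (List Int)) (i : Nat) :
    i ∈ (PySem.List.sorted (PySem.Set.ofList
          (((PySem.Set.ofList (nbp.filter (fun bp => !bp.isEmpty))).filter
            (fun bp => bp.length ≤ leaf.length)).map (fun bp => bp.length)))
          (fun x => x) false).reverse ↔
      ∃ bp ∈ nbp, bp ≠ [] ∧ bp.length = i ∧ bp.length ≤ leaf.length := by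
  rw [List.mem_reverse, mem_sorted_id, PySem.Set.mem_ofList]
  simp only [List.mem_map, List.mem_filter, PySem.Set.mem_ofList, Bool.not_eq_eq_eq_not]
  constructor
  · rintro ⟨bp, ⟨⟨hmem, hemp⟩, hlen⟩, rfl⟩
    exact ⟨bp, hmem, by simpa using hemp, rfl, by simpa using hlen⟩
  · rintro ⟨bp, hbp, hne, rfl, hlen⟩
    exact ⟨bp, ⟨⟨hbp, by simp [hne]⟩, by simpa using hlen⟩, rfl⟩

-- the loop when no probed prefix is in the set
theorem alt_loop_none (leaf : List Int) (bset : PySem.Set (List Int)) :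
    ∀ L : List Nat, (∀ j ∈ L, ¬ PySem.Set.contains bset (leaf.take j) = true) →
    alt_loop leaf bset L = leaf := by
  intro L
  induction L with
  | nil => intro _; rfl
  | cons i t ih =>
      intro h
      rw [alt_loop, if_neg (h i (by simp))]
      exact ih (fun j hj => h j (by simp [hj]))

-- the loop over a strictly decreasing list stops at the largest hitting length K
theorem alt_loop_hit (leaf : List Int) (bset : PySem.Set (List Int)) (K : Nat) :
    ∀ L : List Nat, L.Pairwise (fun a b => b < a) → K ∈ L →
      PySem.Set.contains bset (leaf.take K) = true →
      (∀ j ∈ L, PySem.Set.contains bset (leaf.take j) = true → j ≤ K) →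
      alt_loop leaf bset L = leaf.take (min leaf.length (K + 1)) := by
  intro L
  induction L with
  | nil => intro _ h; exact absurd h (List.not_mem_nil)
  | cons i t ih =>
      intro hpw hK hc hmax
      rcases List.pairwise_cons.mp hpw with ⟨hlt, hpt⟩
      by_cases hci : PySem.Set.contains bset (leaf.take i) = true
      · rw [alt_loop, if_pos hci]
        have hiK : i ≤ K := hmax i (by simp) hci
        have : K = i := by
          rcases List.mem_cons.mp hK with h | h
          · omega
          · have := hlt K h; omega
        rw [this]
      · rw [alt_loop, if_neg hci]
        have hKt : K ∈ t := by
          rcases List.mem_cons.mp hK with h | h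
          · exact absurd (h ▸ hc) hci
          · exact h
        exact ih hpt hKt hc (fun j hj => hmax j (by simp [hj]))

theorem take_clamp (leaf : List Int) (d : Nat) :
    PySem.List.slice leaf none (some ((min leaf.length d : Nat) : Int)) = leaf.take (min leaf.length d) := by
  rw [PySem.List.slice_to_natCast]

-- ===== VERDICT (by name: the statement is the Claim_ definition above) =====
theorem resolve_new_branch_frontier_child_py_spec : Claim_equal_resolve_new_branch_frontier_child_py := by
  intro leaf nbp _
  unfold Spec_resolve_new_branch_frontier_child_py
  unfold resolve_new_branch_frontier_child_py resolve_new_branch_frontier_child_py_alt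
  simp only []
  set bset : PySem.Set (List Int) := PySem.Set.ofList (nbp.filter (fun bp => !bp.isEmpty)) with hbs
  set cand := (PySem.List.sorted (PySem.Set.ofList
      ((bset.filter (fun bp => bp.length ≤ leaf.length)).map (fun bp => bp.length)))
      (fun x => x) false).reverse with hcand
  have hmemc : ∀ i, i ∈ cand ↔ ∃ bp ∈ nbp, bp ≠ [] ∧ bp.length = i ∧ bp.length ≤ leaf.length :=
    fun i => mem_cand_iff leaf nbp i
  set matched := nbp.filter (fun bp => !bp.isEmpty && leaf_under_prefix_py leaf bp) with hm
  cases hmax : PySem.List.max? matched (fun bp => bp.length) with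
  | none =>
      -- no branch matches: every probe of B misses and the loop falls through to leaf
      rw [PySem.List.max?_eq_none_iff] at hmax
      refine (alt_loop_none leaf bset cand ?_).symm
      intro j hj hc
      obtain ⟨bpc, _, hnec, hlc, hnc⟩ := (hmemc j).mp hj
      have hj1 : 1 ≤ j := by
        cases bpc with
        | nil => exact absurd rfl hnec
        | cons a t => simp at hlc; omega
      rw [hbs, contains_bset_iff leaf nbp j hj1 (hlc ▸ hnc)] at hc
      obtain ⟨bp, hbp, hne, _, hl, ht⟩ := hc
      have : bp ∈ matched := by rw [hm, mem_matched_iff]; exact ⟨hbp, hne, hl, ht⟩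
      rw [hmax] at this
      exact absurd this (List.not_mem_nil)
  | some anchor =>
      have hamem : anchor ∈ matched := PySem.List.max?_mem hmax
      have hmax' := PySem.List.max?_isMax hmax
      rw [hm, mem_matched_iff] at hamem
      obtain ⟨hin, hne, hlen, htk⟩ := hamem
      have hL1 : 1 ≤ anchor.length := by
        cases anchor with
        | nil => exact absurd rfl hne
        | cons a t => simp
      have hpw : cand.Pairwise (fun a b => b < a) := by
        rw [hcand, List.pairwise_reverse]
        exact PySem.List.sorted_ofList_pairwise_lt _
      have hscan : alt_loop leaf bset cand = leaf.take (min leaf.length (anchor.length + 1)) := by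
        refine alt_loop_hit leaf bset anchor.length cand hpw ?_ ?_ ?_
        · exact (hmemc anchor.length).mpr ⟨anchor, hin, hne, rfl, hlen⟩
        · rw [hbs, contains_bset_iff leaf nbp anchor.length hL1 hlen]
          exact ⟨anchor, hin, hne, rfl, hlen, htk⟩
        · intro j hj hc
          obtain ⟨bpc, _, hnec, hlc, hnc⟩ := (hmemc j).mp hj
          have hj1 : 1 ≤ j := by
            cases bpc with
            | nil => exact absurd rfl hnec
            | cons a t => simp at hlc; omega
          rw [hbs, contains_bset_iff leaf nbp j hj1 (hlc ▸ hnc)] at hc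
          obtain ⟨bp, hbp, hbne, hbl, hl, ht⟩ := hc
          have : bp ∈ matched := by rw [hm, mem_matched_iff]; exact ⟨hbp, hbne, hl, ht⟩
          have := hmax' _ this
          omega
      rw [hscan]
      exact take_clamp leaf (anchor.length + 1)
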